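-- pv_equiv track=rewrite | github.com/joeyhentel/diderot-ai | streamlit_app.py | cluster_by_keyword
-- ===== SOURCE A (Python) =====
-- from collections import defaultdict
--
-- def cluster_by_keyword(articles):
--     clusters = defaultdict(list)
--     for art in articles:
--         keywords = [w.lower().strip(".,!?") for w in art["title"].split() if len(w) > 4]
--         for kw in keywords:
--             clusters[kw].append(art)
--     filtered = {k: v for k, v in clusters.items() if len({a["source"] for a in v}) >= 2}
--     return filtered
-- ===== SOURCE B (Python) =====
-- def _keywords(title):
--     return [w.lower().strip(".,!?") for w in title.split() if len(w) > 4]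
--
-- def cluster_by_keyword(articles):
--     # Two staged passes: pass 1 decides which keywords qualify (seen under at
--     # least two distinct sources) without building any clusters; pass 2 groups
--     # only the qualifying keywords, so no cluster is ever built and thrown away
--     # and there is no final filter step.
--     seen = {}   # keyword -> the single source seen so far
--     kept = set()  # keywords already known to have >= 2 distinct sources
--     for art in articles:
--         for kw in _keywords(art["title"]):
--             if kw in kept:
--                 continue
--             src = art["source"]
--             if kw not in seen:
--                 seen[kw] = src
--             elif seen[kw] != src:
--                 kept.add(kw)
--     result = {}
--     for art in articles:
--         for kw in _keywords(art["title"]):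
--             if kw in kept:
--                 result.setdefault(kw, []).append(art)
--     return result
-- ===== Notes on version B (the rewrite author's own statement) =====
-- stated objective: alternative
-- what changed: B never builds clusters to discard: a first pass only decides which keywords qualify (tracking one seen source per keyword and promoting it to a kept set on a second distinct source), and a second pass groups articles solely under the kept keywords, so A's group-everything-then-filter-by-rescanning-sources structure disappears.
import Mathlib
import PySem

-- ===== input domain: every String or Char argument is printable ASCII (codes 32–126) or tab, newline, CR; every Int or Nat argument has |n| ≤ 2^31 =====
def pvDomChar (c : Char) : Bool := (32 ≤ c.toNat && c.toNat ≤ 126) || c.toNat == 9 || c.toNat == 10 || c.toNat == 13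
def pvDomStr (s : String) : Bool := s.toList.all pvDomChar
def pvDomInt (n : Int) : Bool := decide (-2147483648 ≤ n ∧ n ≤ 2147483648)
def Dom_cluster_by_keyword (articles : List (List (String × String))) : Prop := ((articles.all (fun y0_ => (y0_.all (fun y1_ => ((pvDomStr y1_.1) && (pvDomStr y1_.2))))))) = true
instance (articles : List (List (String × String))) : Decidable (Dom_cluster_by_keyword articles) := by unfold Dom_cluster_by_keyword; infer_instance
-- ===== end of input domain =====

-- B replaces A's group-everything-then-filter structure by two staged passes: pass 1 only
-- decides which keywords qualify (>= 2 distinct sources), pass 2 groups the kept keywords.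

-- shared helper: w.lower().strip(".,!?")
def pvKw (w : String) : String := PySem.Str.stripChars (PySem.Str.lower w) ".,!?"
-- shared helper: art[k] (Pre_ guarantees the key is present wherever Python reads it; "" only outside Pre_)
def pvGet (art : List (String × String)) (k : String) : String := (PySem.Dict.mk art).getD k ""
-- shared helper: the keyword comprehension [w.lower().strip(".,!?") for w in title.split() if len(w) > 4]
def pvKeywords (title : String) : List String :=
  ((PySem.Str.split₀ title).filter (fun w => 4 < PySem.Str.len w)).map pvKw

-- ===== PORT A =====
def cluster_by_keyword (articles : List (List (String × String))) : List (String × List (List (String × String))) :=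
  let clusters : PySem.Dict String (List (List (String × String))) :=
    articles.foldl (fun d art => (pvKeywords (pvGet art "title")).foldl (fun d kw => d.modify kw [] (· ++ [art])) d) PySem.Dict.empty
  clusters.items.filter (fun kv => 2 ≤ PySem.Set.len (PySem.Set.ofList (kv.2.map (fun a => pvGet a "source"))))

-- ===== PORT B =====
def cluster_by_keyword_alt (articles : List (List (String × String))) : List (String × List (List (String × String))) :=
  -- pass 1: seen : keyword -> the single source seen so far, kept : keywords with >= 2 distinct sources
  let p : PySem.Dict String String × PySem.Set String :=
    articles.foldl (fun p art =>
      (pvKeywords (pvGet art "title")).foldl (fun p kw =>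
        if p.2.contains kw then p
        else
          let src := pvGet art "source"
          match p.1.get? kw with
          | none => (p.1.insert kw src, p.2)
          | some prev => if prev ≠ src then (p.1, p.2.add kw) else p) p)
      (PySem.Dict.empty, PySem.Set.empty)
  -- pass 2: group only the kept keywords
  articles.foldl (fun d art =>
    (pvKeywords (pvGet art "title")).foldl (fun d kw =>
      if p.2.contains kw then d.modify kw [] (· ++ [art]) else d) d)
    (PySem.Dict.empty : PySem.Dict String (List (List (String × String)))) |>.items

-- ===== PRECONDITION & SPEC =====
-- Pre_ excludes exactly the inputs on which A raises KeyError: an article without a "title"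
-- key, or an article whose title contains a word longer than 4 characters (so it lands in a
-- cluster and its source is read) but which has no "source" key.
def Pre_cluster_by_keyword (articles : List (List (String × String))) : Prop :=
  ∀ art ∈ articles, (PySem.Dict.mk art).contains "title" = true ∧
    ((PySem.Str.split₀ (pvGet art "title")).any (fun w => 4 < PySem.Str.len w) = true →
      (PySem.Dict.mk art).contains "source" = true)
instance (articles : List (List (String × String))) : Decidable (Pre_cluster_by_keyword articles) := by unfold Pre_cluster_by_keyword; infer_instance

def pvWitness_cluster_by_keyword : (List (List (String × String))) :=
  [[("title", "apple pie"), ("source", "s1")], [("title", "apple tart"), ("source", "s2")]]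

def Spec_cluster_by_keyword (articles : List (List (String × String))) (out : List (String × List (List (String × String)))) : Prop := out = cluster_by_keyword_alt articles
instance (articles : List (List (String × String))) (out : List (String × List (List (String × String)))) : Decidable (Spec_cluster_by_keyword articles out) := by unfold Spec_cluster_by_keyword; infer_instance

-- ===== CLAIM (what is proved, stated in full; the proofs are below) =====
def Claim_equal_cluster_by_keyword : Prop := ∀ (articles : List (List (String × String))), Dom_cluster_by_keyword articles → Pre_cluster_by_keyword articles → Spec_cluster_by_keyword articles (cluster_by_keyword articles)

-- ===== LEMMAS AND PROOFS =====

-- the flattened (keyword, article) stream both double loops traverse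
def pvPairs (articles : List (List (String × String))) : List (String × List (String × String)) :=
  articles.flatMap (fun art => (pvKeywords (pvGet art "title")).map (fun kw => (kw, art)))

-- the sources of keyword c's cluster, in cluster order
def pvSrcs (c : String) (P : List (String × List (String × String))) : List String :=
  (P.filter (fun q => q.1 == c)).map (fun q => pvGet q.2 "source")

-- "this list contains two distinct values"
def pvTwo (l : List String) : Prop := ∃ a ∈ l, ∃ b ∈ l, a ≠ b

-- B's pass-1 step, on one (keyword, article) pair
def pvStep (p : PySem.Dict String String × PySem.Set String) (q : String × List (String × String)) : PySem.Dict String String × PySem.Set String :=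
  if p.2.contains q.1 then p
  else
    match p.1.get? q.1 with
    | none => (p.1.insert q.1 (pvGet q.2 "source"), p.2)
    | some prev => if prev ≠ pvGet q.2 "source" then (p.1, p.2.add q.1) else p

theorem pv_foldl_flatMap {α β γ : Type} (l : List α) (g : α → List β) (f : γ → β → γ) (init : γ) :
    (l.flatMap g).foldl f init = l.foldl (fun acc a => (g a).foldl f acc) init := by
  induction l generalizing init with
  | nil => rfl
  | cons a l ih => simp [List.flatMap_cons, List.foldl_append, ih]

-- the nested article/keyword loop IS a fold over the pair stream
theorem pv_fold_pairs {σ : Type} (articles : List (List (String × String))) (g : σ → String × List (String × String) → σ) (init : σ) :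
    articles.foldl (fun st art => (pvKeywords (pvGet art "title")).foldl (fun st kw => g st (kw, art)) st) init
      = (pvPairs articles).foldl g init := by
  rw [pvPairs, pv_foldl_flatMap]
  simp [List.foldl_map]

theorem pvSrcs_cons (c : String) (q : String × List (String × String)) (P : List (String × List (String × String))) :
    pvSrcs c (q :: P) = (if q.1 == c then [pvGet q.2 "source"] else []) ++ pvSrcs c P := by
  simp only [pvSrcs, List.filter_cons]
  by_cases h : q.1 == c <;> simp [h]

theorem pvTwo_append_of_two {l : List String} (s : String) (h : pvTwo l) : pvTwo (l ++ [s]) := by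
  obtain ⟨a, ha, b, hb, hab⟩ := h
  exact ⟨a, by simp [ha], b, by simp [hb], hab⟩

theorem pvTwo_ne_nil {l : List String} (h : pvTwo l) : l ≠ [] := by
  rintro rfl; obtain ⟨a, ha, -⟩ := h; simp at ha

-- pass-1 invariant: seen holds each keyword's first source, kept the keywords with two distinct sources
theorem pv_pass1_inv (P : List (String × List (String × String)))
    (st : PySem.Dict String String × PySem.Set String) (g : String → List String)
    (h : ∀ c, st.1.get? c = (g c).head? ∧ (st.2.contains c = true ↔ pvTwo (g c))) :
    ∀ c, (P.foldl pvStep st).1.get? c = (g c ++ pvSrcs c P).head? ∧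
      ((P.foldl pvStep st).2.contains c = true ↔ pvTwo (g c ++ pvSrcs c P)) := by
  induction P generalizing st g with
  | nil => intro c; simpa [pvSrcs] using h c
  | cons q P ih =>
    rw [List.foldl_cons]
    have key : ∀ c, (pvStep st q).1.get? c = ((fun c => if q.1 = c then g c ++ [pvGet q.2 "source"] else g c) c).head? ∧
        ((pvStep st q).2.contains c = true ↔ pvTwo ((fun c => if q.1 = c then g c ++ [pvGet q.2 "source"] else g c) c)) := by
      intro c
      obtain ⟨hs, hk⟩ := h c
      obtain ⟨hsq, hkq⟩ := h q.1
      by_cases hc : q.1 = c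
      · subst hc
        simp only [if_true]
        by_cases hkept : st.2.contains q.1
        · -- already kept: state unchanged, the keyword already has two distinct sources
          have h2 := hkq.mp hkept
          cases hg : g q.1 with
          | nil => exact absurd hg (pvTwo_ne_nil h2)
          | cons a t =>
            refine ⟨?_, ?_⟩
            · rw [pvStep, if_pos hkept, hs, hg]; simp
            · rw [pvStep, if_pos hkept]
              exact ⟨fun hx => hg ▸ pvTwo_append_of_two _ (hg ▸ hkq.mp hx), fun _ => hkept⟩
        · cases hget : st.1.get? q.1 with
          | none =>
            have hnil : g q.1 = [] := List.head?_eq_none_iff.mp (hsq.symm.trans hget)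
            constructor
            · rw [pvStep, if_neg hkept]
              simp only [hget, PySem.Dict.get?_insert_self, hnil, List.nil_append]
              rfl
            · rw [pvStep, if_neg hkept]
              simp only [hget, hnil, List.nil_append]
              rw [hk, hnil]
              constructor
              · rintro ⟨a, ha, -⟩; simp at ha
              · rintro ⟨a, ha, b, hb, hab⟩
                simp at ha hb; exact absurd (ha.trans hb.symm) hab
          | some prev =>
            have hhd : (g q.1).head? = some prev := hsq.symm.trans hget
            have hmem : prev ∈ g q.1 := List.mem_of_mem_head? (by rw [hhd]; rfl)
            by_cases hne : prev ≠ pvGet q.2 "source"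
            · constructor
              · rw [pvStep, if_neg hkept]
                simp only [hget, if_pos hne, List.head?_append, hhd]
                rfl
              · rw [pvStep, if_neg hkept]
                simp only [hget, if_pos hne]
                constructor
                · intro _; exact ⟨prev, by simp [hmem], pvGet q.2 "source", by simp, hne⟩
                · intro _
                  simp [PySem.Set.mem_add]
            · have heq : prev = pvGet q.2 "source" := not_ne_iff.mp hne
              constructor
              · rw [pvStep, if_neg hkept]
                simp only [hget, if_neg hne, List.head?_append, hhd]
                rfl
              · rw [pvStep, if_neg hkept]
                simp only [hget, if_neg hne]
                rw [hk]
                constructor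
                · intro hx; exact pvTwo_append_of_two _ hx
                · rintro ⟨a, ha, b, hb, hab⟩
                  have hall : ∀ x ∈ g q.1 ++ [pvGet q.2 "source"], x = prev := by
                    intro x hx
                    rcases List.mem_append.mp hx with hx | hx
                    · by_contra hxp
                      exact hkept (hk.mpr ⟨x, hx, prev, hmem, hxp⟩)
                    · simp at hx; rw [hx, heq]
                  exact absurd ((hall a ha).trans (hall b hb).symm) hab
      · -- a different keyword: nothing about c changes
        simp only [if_neg hc]
        rw [pvStep]
        split
        · exact ⟨hs, hk⟩
        · split
          · exact ⟨by rw [PySem.Dict.get?_insert_of_ne _ _ (Ne.symm hc)]; exact hs, hk⟩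
          · split
            · refine ⟨hs, ?_⟩
              rw [← hk]
              simp only [PySem.Set.contains_iff, PySem.Set.mem_add]
              constructor
              · rintro (hm | rfl)
                · exact hm
                · exact absurd rfl hc
              · exact Or.inl
            · exact ⟨hs, hk⟩
    intro c
    have := ih (pvStep st q) (fun c => if q.1 = c then g c ++ [pvGet q.2 "source"] else g c) key c
    rw [pvSrcs_cons]
    by_cases hc : q.1 = c
    · subst hc; simpa [List.append_assoc] using this
    · simpa [hc, beq_iff_eq] using this

-- two distinct values iff the distinct-source set has size >= 2
theorem pvTwo_iff_len (l : List String) : pvTwo l ↔ 2 ≤ PySem.Set.len (PySem.Set.ofList l) := by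
  have hmem : ∀ x, x ∈ PySem.Set.ofList l ↔ x ∈ l := fun x => PySem.Set.mem_ofList l x
  have hnd : (PySem.Set.ofList l).Nodup := PySem.Set.nodup_ofList l
  rw [PySem.Set.len]
  cases hof : PySem.Set.ofList l with
  | nil =>
    simp only [hof] at hmem
    constructor
    · rintro ⟨a, ha, -⟩; simp [← hmem a] at ha
    · intro h; simp at h
  | cons x t =>
    cases t with
    | nil =>
      simp only [hof] at hmem
      constructor
      · rintro ⟨a, ha, b, hb, hab⟩
        have ha' : a = x := by simpa using (hmem a).mpr ha
        have hb' : b = x := by simpa using (hmem b).mpr hb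
        exact (hab (ha'.trans hb'.symm)).elim
      · intro h; simp at h
    | cons y t' =>
      rw [hof] at hmem hnd
      constructor
      · intro _; simp; omega
      · intro _
        refine ⟨x, (hmem x).mp (by simp), y, (hmem y).mp (by simp), ?_⟩
        intro hxy; subst hxy
        simp at hnd
    
-- ofList commutes with filter (first occurrences are preserved)
theorem pv_ofList_filter (l : List String) (p : String → Bool) :
    PySem.Set.ofList (l.filter p) = (PySem.Set.ofList l).filter p := by
  induction l using List.reverseRecOn with
  | nil => rfl
  | append_singleton l x ih =>
    by_cases hp : p x
    · have hfx : List.filter p [x] = [x] := by simp [hp]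
      rw [List.filter_append, hfx, PySem.Set.ofList_append_singleton,
          PySem.Set.ofList_append_singleton, ih, PySem.Set.add_eq_ite, PySem.Set.add_eq_ite]
      by_cases hm : x ∈ PySem.Set.ofList l
      · rw [if_pos hm, if_pos (by simp [List.mem_filter, hm, hp])]
      · rw [if_neg hm, if_neg (by simp [List.mem_filter, hm]), List.filter_append, hfx]
    · have hfx : List.filter p [x] = [] := by simp [hp]
      rw [List.filter_append, hfx, List.append_nil, ih, PySem.Set.ofList_append_singleton,
          PySem.Set.add_eq_ite]
      by_cases hm : x ∈ PySem.Set.ofList l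
      · rw [if_pos hm]
      · rw [if_neg hm, List.filter_append]
        simp [hp]

-- ===== VERDICT (by name: the statement is the Claim_ definition above) =====
theorem cluster_by_keyword_spec : Claim_equal_cluster_by_keyword := by
  intro articles _ _
  unfold Spec_cluster_by_keyword
  simp only [cluster_by_keyword, cluster_by_keyword_alt]
  set P := pvPairs articles with hP
  -- A's clusters dict as a fold over the pair stream
  have hA : articles.foldl (fun d art => (pvKeywords (pvGet art "title")).foldl (fun d kw => d.modify kw [] (· ++ [art])) d) PySem.Dict.empty
      = P.foldl (fun d q => d.modify q.1 [] (· ++ [q.2])) PySem.Dict.empty :=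
    pv_fold_pairs articles (fun d q => d.modify q.1 [] (· ++ [q.2])) PySem.Dict.empty
  -- B's pass 1 as a fold over the pair stream
  have hB1 : articles.foldl (fun p art =>
      (pvKeywords (pvGet art "title")).foldl (fun p kw =>
        if p.2.contains kw then p
        else
          let src := pvGet art "source"
          match p.1.get? kw with
          | none => (p.1.insert kw src, p.2)
          | some prev => if prev ≠ src then (p.1, p.2.add kw) else p) p)
      (PySem.Dict.empty, PySem.Set.empty)
      = P.foldl pvStep (PySem.Dict.empty, PySem.Set.empty) :=
    pv_fold_pairs articles pvStep _
  rw [hA, hB1]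
  set kept := (P.foldl pvStep (PySem.Dict.empty, PySem.Set.empty)).2 with hkeptdef
  -- B's pass 2 as a fold over the pair stream, then over the kept pairs
  have hB2 : articles.foldl (fun d art =>
      (pvKeywords (pvGet art "title")).foldl (fun d kw =>
        if kept.contains kw then d.modify kw [] (· ++ [art]) else d) d)
      (PySem.Dict.empty : PySem.Dict String (List (List (String × String))))
      = (P.filter (fun q => kept.contains q.1)).foldl (fun d q => d.modify q.1 [] (· ++ [q.2])) PySem.Dict.empty := by
    rw [List.foldl_filter]
    exact pv_fold_pairs articles
      (fun d q => if kept.contains q.1 then d.modify q.1 [] (· ++ [q.2]) else d) PySem.Dict.empty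
  rw [hB2]
  -- characterise kept
  have hkept : ∀ c, kept.contains c = decide (2 ≤ PySem.Set.len (PySem.Set.ofList (pvSrcs c P))) := by
    intro c
    have hinv := pv_pass1_inv P (PySem.Dict.empty, PySem.Set.empty) (fun _ => [])
      (fun c => ⟨PySem.Dict.get?_empty c, by
        constructor
        · intro h; simp [PySem.Set.empty, PySem.Set.contains_eq_listContains] at h
        · rintro ⟨a, ha, -⟩; simp at ha⟩) c
    simp only [List.nil_append] at hinv
    rw [Bool.eq_iff_iff, hkeptdef, hinv.2, pvTwo_iff_len]
    simp
  -- both sides in canonical form: keys in first-appearance order, values from the pair stream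
  have hCval : ∀ c, (P.foldl (fun d q => d.modify q.1 [] (· ++ [q.2])) PySem.Dict.empty).getD c ([] : List (List (String × String)))
      = (P.filter (fun q => q.1 == c)).map (·.2) := by
    intro c
    rw [PySem.Dict.getD_foldl_modify_append]
    simp
  have hCkeys : (P.foldl (fun d q => d.modify q.1 [] (· ++ [q.2])) PySem.Dict.empty).keys
      = PySem.Set.ofList (P.map (·.1)) := by
    rw [PySem.Dict.keys_foldl_modify_key P (·.1) [] (fun _ q l => l ++ [q.2])]
    rw [PySem.Dict.keys_empty, PySem.Set.update_nil_left]
  have hCnodup : (P.foldl (fun d q => d.modify q.1 [] (· ++ [q.2])) PySem.Dict.empty).keys.Nodup := by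
    rw [hCkeys]; exact PySem.Set.nodup_ofList _
  -- A's side
  rw [PySem.Dict.items_eq_map_keys _ hCnodup [], hCkeys, List.filter_map]
  -- B's side
  have hDval : ∀ c, ((P.filter (fun q => kept.contains q.1)).foldl (fun d q => d.modify q.1 [] (· ++ [q.2])) PySem.Dict.empty).getD c ([] : List (List (String × String)))
      = ((P.filter (fun q => kept.contains q.1)).filter (fun q => q.1 == c)).map (·.2) := by
    intro c
    rw [PySem.Dict.getD_foldl_modify_append]
    simp
  have hDkeys : ((P.filter (fun q => kept.contains q.1)).foldl (fun d q => d.modify q.1 [] (· ++ [q.2])) PySem.Dict.empty).keys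
      = (PySem.Set.ofList (P.map (·.1))).filter (fun c => kept.contains c) := by
    rw [PySem.Dict.keys_foldl_modify_key (P.filter (fun q => kept.contains q.1)) (·.1) [] (fun _ q l => l ++ [q.2])]
    rw [PySem.Dict.keys_empty, PySem.Set.update_nil_left, ← pv_ofList_filter, List.filter_map]
    rfl
  have hDnodup : ((P.filter (fun q => kept.contains q.1)).foldl (fun d q => d.modify q.1 [] (· ++ [q.2])) PySem.Dict.empty).keys.Nodup := by
    rw [hDkeys]; exact List.Nodup.filter _ (PySem.Set.nodup_ofList _)
  rw [PySem.Dict.items_eq_map_keys _ hDnodup [], hDkeys]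
  -- align the filter predicates and the map functions
  rw [List.filter_congr (fun c _ => by
    show ((fun kv => decide (2 ≤ PySem.Set.len (PySem.Set.ofList (kv.2.map (fun a => pvGet a "source"))))) ∘
        (fun k => (k, (P.foldl (fun d q => d.modify q.1 [] (· ++ [q.2])) PySem.Dict.empty).getD k []))) c
      = kept.contains c
    simp only [Function.comp, hCval, hkept, pvSrcs, List.map_map]
    rfl)]
  refine List.map_congr_left (fun c hc => ?_)
  have hck : kept.contains c = true := (List.mem_filter.mp hc).2
  rw [hCval, hDval]
  have : (P.filter (fun q => kept.contains q.1)).filter (fun q => q.1 == c) = P.filter (fun q => q.1 == c) := by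
    rw [List.filter_filter]
    refine List.filter_congr (fun q _ => ?_)
    by_cases hqc : q.1 == c
    · have hq1 : q.1 = c := by simpa using hqc
      simp only [hq1, beq_self_eq_true, Bool.true_and]
      exact hck
    · simp [hqc]
  rw [this]
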